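-- pv_equiv track=rewrite | github.com/mw197hub/codingame | easy/Metric Units/main.py | berechnen
-- ===== SOURCE A (Python) =====
-- def berechnen(wert1,wert2,m1,m2,mList,reihe):
--     erg = wert1
--     while True:
--         if m1 == m2:
--             break
--         wert2 = wert2 * mList[m2]
--         pos = 0
--         for r in reihe:
--             if r == m2:
--                 break
--             pos += 1
--         m2 = reihe[pos-1]
--     erg += wert2
--     return erg
-- ===== SOURCE B (Python) =====
-- def berechnen(wert1, wert2, m1, m2, mList, reihe):
--     # single pass over a precomputed unit list instead of A's step-and-rescan while loop;
--     # when m2 precedes m1 the walked units wrap past index 0 to the end of the chain, as in A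
--     if m1 != m2:
--         i1 = reihe.index(m1)
--         i2 = reihe.index(m2)
--         if i1 <= i2:
--             units = reihe[i1 + 1:i2 + 1]
--         else:
--             units = reihe[:i2 + 1] + reihe[i1 + 1:]
--         for u in units:
--             wert2 *= mList[u]
--     return wert1 + wert2
-- ===== Notes on version B (the rewrite author's own statement) =====
-- stated objective: simpler
-- what changed: Replaces A's while-loop that steps m2 backwards one unit at a time and rescans reihe from the front on every step with a direct computation: look up both endpoint indices once and multiply the factors of one precomputed unit list (a slice, or two slices when the walk wraps past index 0) in a single pass.
-- outside the precondition, e.g. on berechnen(6, -3, 'z', 'cb', {'z': 6, 'cb': 6}, ['z', 'z', 'z', 'z']): A returns -12, B raises ValueError; on berechnen(0, 1, 'a', 'b', {'b': 2}, ['a', 'b', 'a']): A returns 2, B returns 2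
import Mathlib
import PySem

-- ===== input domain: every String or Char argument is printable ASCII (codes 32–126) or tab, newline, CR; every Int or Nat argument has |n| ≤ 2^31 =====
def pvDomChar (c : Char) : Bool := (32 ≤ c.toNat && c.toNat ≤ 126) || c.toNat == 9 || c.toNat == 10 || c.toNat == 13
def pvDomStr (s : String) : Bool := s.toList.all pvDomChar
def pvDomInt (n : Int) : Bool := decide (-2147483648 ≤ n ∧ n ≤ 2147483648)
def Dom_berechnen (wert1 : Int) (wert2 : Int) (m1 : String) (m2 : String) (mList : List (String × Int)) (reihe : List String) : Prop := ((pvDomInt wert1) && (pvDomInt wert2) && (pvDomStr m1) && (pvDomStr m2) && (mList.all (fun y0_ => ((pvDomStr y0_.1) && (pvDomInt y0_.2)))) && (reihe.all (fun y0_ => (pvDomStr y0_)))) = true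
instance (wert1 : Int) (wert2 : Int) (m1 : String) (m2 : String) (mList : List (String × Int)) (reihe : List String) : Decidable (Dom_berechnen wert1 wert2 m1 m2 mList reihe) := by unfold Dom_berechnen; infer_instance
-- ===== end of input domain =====

-- B replaces A's step-and-rescan while loop by index() + one multiplication pass over a precomputed unit list (simpler).


-- ===== PORT A =====
-- mList[u]: first-match lookup in the association list (none = KeyError)
def pvLookup (mList : List (String × Int)) (u : String) : Option Int :=
  (mList.find? (fun p => p.1 == u)).map (·.2)

-- 'pos = 0; for r in reihe: if r == m2: break; pos += 1'
def posOf : List String → String → Nat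
  | [], _ => 0
  | r :: rs, m => if r == m then 0 else posOf rs m + 1

-- the 'while True' loop, fuel-bounded (reihe.length + 1 covers every terminating run);
-- none = KeyError / IndexError / fuel exhausted (Python diverges), all excluded by Pre_
def berechnenLoop (m1 : String) (mList : List (String × Int)) (reihe : List String) :
    Nat → Int → String → Option Int
  | 0, _, _ => none
  | fuel + 1, wert2, m2 =>
    if m1 == m2 then some wert2
    else
      match pvLookup mList m2 with
      | none => none
      | some f =>
        match PySem.List.pyGet? reihe ((posOf reihe m2 : Int) - 1) with
        | none => none
        | some m2' => berechnenLoop m1 mList reihe fuel (wert2 * f) m2'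

def berechnen (wert1 : Int) (wert2 : Int) (m1 : String) (m2 : String) (mList : List (String × Int)) (reihe : List String) : Int :=
  match berechnenLoop m1 mList reihe (reihe.length + 1) wert2 m2 with
  | some w => wert1 + w
  | none => 0

-- ===== PORT B =====
-- 'for u in units: wert2 *= mList[u]' (none = KeyError)
def multAll (mList : List (String × Int)) : List String → Int → Option Int
  | [], w => some w
  | u :: us, w =>
    match pvLookup mList u with
    | none => none
    | some f => multAll mList us (w * f)

def berechnen_alt (wert1 : Int) (wert2 : Int) (m1 : String) (m2 : String) (mList : List (String × Int)) (reihe : List String) : Int :=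
  if m1 == m2 then wert1 + wert2
  else
    match PySem.List.index? reihe m1, PySem.List.index? reihe m2 with
    | some i1, some i2 =>
      let units :=
        if i1 ≤ i2 then PySem.List.slice reihe (some ((i1 : Int) + 1)) (some ((i2 : Int) + 1))
        else PySem.List.slice reihe none (some ((i2 : Int) + 1)) ++
             PySem.List.slice reihe (some ((i1 : Int) + 1)) none
      match multAll mList units wert2 with
      | some w => wert1 + w
      | none => 0
    | _, _ => 0

-- ===== PRECONDITION & SPEC =====
-- the units whose factors A's loop looks up (wrapping past index 0 when m2 precedes m1)
def pvNeeded (m1 m2 : String) (reihe : List String) : List String :=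
  let i1 := reihe.idxOf m1
  let i2 := reihe.idxOf m2
  if i1 ≤ i2 then (reihe.drop (i1 + 1)).take (i2 - i1)
  else reihe.take (i2 + 1) ++ reihe.drop (i1 + 1)

-- Pre_ excludes inputs where A raises (a needed factor missing from mList) or diverges (m1 not in reihe);
-- inputs where m2 is missing from reihe, on which A accidentally restarts the chain from reihe[-1] via
-- pos = len(reihe) while B's reihe.index(m2) raises ValueError; and reihe with duplicate units, on which
-- A's first-index backward chain is accidental (it can diverge).
def Pre_berechnen (wert1 : Int) (wert2 : Int) (m1 : String) (m2 : String) (mList : List (String × Int)) (reihe : List String) : Prop :=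
  m1 = m2 ∨ (reihe.Nodup ∧ m1 ∈ reihe ∧ m2 ∈ reihe ∧
    ∀ u ∈ pvNeeded m1 m2 reihe, u ∈ mList.map (·.1))
instance (wert1 : Int) (wert2 : Int) (m1 : String) (m2 : String) (mList : List (String × Int)) (reihe : List String) : Decidable (Pre_berechnen wert1 wert2 m1 m2 mList reihe) := by unfold Pre_berechnen; infer_instance

def pvWitness_berechnen : Int × Int × String × String × (List (String × Int)) × List String :=
  (0, 5, "m", "km", [("km", 1000)], ["m", "km"])

def Spec_berechnen (wert1 : Int) (wert2 : Int) (m1 : String) (m2 : String) (mList : List (String × Int)) (reihe : List String) (out : Int) : Prop := out = berechnen_alt wert1 wert2 m1 m2 mList reihe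
instance (wert1 : Int) (wert2 : Int) (m1 : String) (m2 : String) (mList : List (String × Int)) (reihe : List String) (out : Int) : Decidable (Spec_berechnen wert1 wert2 m1 m2 mList reihe out) := by unfold Spec_berechnen; infer_instance

-- ===== CLAIM (what is proved, stated in full; the proofs are below) =====
def Claim_equal_berechnen : Prop := ∀ (wert1 : Int) (wert2 : Int) (m1 : String) (m2 : String) (mList : List (String × Int)) (reihe : List String), Dom_berechnen wert1 wert2 m1 m2 mList reihe → Pre_berechnen wert1 wert2 m1 m2 mList reihe → Spec_berechnen wert1 wert2 m1 m2 mList reihe (berechnen wert1 wert2 m1 m2 mList reihe)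

-- ===== LEMMAS AND PROOFS =====

-- product of the factors of a unit list (proof-side spec; getD 1 is only read where the key exists)
def pvProd (mList : List (String × Int)) (us : List String) : Int :=
  (us.map (fun u => (pvLookup mList u).getD 1)).prod

theorem pvProd_append (mList : List (String × Int)) (us vs : List String) :
    pvProd mList (us ++ vs) = pvProd mList us * pvProd mList vs := by
  simp [pvProd]

theorem pvLookup_isSome {mList : List (String × Int)} {u : String}
    (h : u ∈ mList.map (·.1)) : ∃ f, pvLookup mList u = some f := by
  obtain ⟨p, hp, hpu⟩ := List.mem_map.mp h
  have h2 : (List.find? (fun q => q.1 == u) mList).isSome :=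
    List.find?_isSome.mpr ⟨p, hp, by simp [hpu]⟩
  obtain ⟨q, hq⟩ := Option.isSome_iff_exists.mp h2
  exact ⟨q.2, by simp [pvLookup, hq]⟩

theorem multAll_spec (mList : List (String × Int)) (us : List String) :
    ∀ (w : Int), (∀ u ∈ us, u ∈ mList.map (·.1)) →
    multAll mList us w = some (w * pvProd mList us) := by
  induction us with
  | nil => intro w _; simp [multAll, pvProd]
  | cons u us ih =>
    intro w h
    obtain ⟨f, hf⟩ := pvLookup_isSome (h u (by simp))
    simp only [multAll, hf]
    rw [ih (w * f) (fun v hv => h v (by simp [hv]))]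
    simp [pvProd, hf, mul_assoc]

theorem posOf_eq_idxOf (l : List String) (m : String) : posOf l m = l.idxOf m := by
  induction l with
  | nil => simp [posOf]
  | cons r rs ih =>
    rw [posOf, List.idxOf_cons, ih]
    by_cases h : r == m <;> simp [h]

theorem index?_of_mem_nodup {l : List String} {m : String} (hnd : l.Nodup) (h : m ∈ l) :
    PySem.List.index? l m = some (l.idxOf m) := by
  rw [PySem.List.index?_eq_idxOf?]
  rw [List.idxOf?_eq_some_iff]
  have hlt : l.idxOf m < l.length := List.idxOf_lt_length_iff.mpr h
  refine ⟨hlt, List.getElem_idxOf hlt, ?_⟩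
  intro j hj hjm
  have := hnd.idxOf_getElem j (by omega)
  rw [hjm] at this
  omega

-- descending phase: from reihe[i1 + d] down to reihe[i1] = m1
theorem loop_spec (m1 : String) (mList : List (String × Int)) (reihe : List String)
    (hnd : reihe.Nodup) (i1 : Nat) (hi1 : i1 < reihe.length) (hm1 : reihe[i1] = m1) :
    ∀ d (j : Nat) (hj : j < reihe.length) (w : Int) (fuel : Nat),
      j = i1 + d → d + 1 ≤ fuel →
      (∀ u ∈ (reihe.drop (i1 + 1)).take d, u ∈ mList.map (·.1)) →
      berechnenLoop m1 mList reihe fuel w reihe[j] =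
        some (w * pvProd mList ((reihe.drop (i1 + 1)).take d)) := by
  intro d
  induction d with
  | zero =>
    intro j hj w fuel hji hfuel hkeys
    match fuel, hfuel with
    | f + 1, _ =>
      have hjm : reihe[j] = m1 := by subst hji; simpa using hm1
      rw [berechnenLoop, if_pos (by simp [hjm])]
      simp [pvProd]
  | succ d ih =>
    intro j hj w fuel hji hfuel hkeys
    match fuel, hfuel with
    | f + 1, _ =>
      subst hji
      have hne : (m1 == reihe[i1 + (d + 1)]) = false := by
        simp only [beq_eq_false_iff_ne, ne_eq]
        intro h
        have h1 : reihe.idxOf reihe[i1 + (d + 1)] = i1 + (d + 1) := hnd.idxOf_getElem _ hj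
        rw [← h, ← hm1, hnd.idxOf_getElem i1 hi1] at h1
        omega
      have hdlen : d < (reihe.drop (i1 + 1)).length := by simp [List.length_drop]; omega
      have hidx : i1 + 1 + d = i1 + (d + 1) := by omega
      have hdval : (reihe.drop (i1 + 1))[d]'hdlen = reihe[i1 + (d + 1)] := by
        rw [List.getElem_drop]; simp [hidx]
      have hmemu : reihe[i1 + (d + 1)] ∈ (reihe.drop (i1 + 1)).take (d + 1) := by
        rw [List.mem_take_iff_getElem]
        exact ⟨d, by simp [List.length_drop]; omega, hdval⟩
      obtain ⟨f0, hf0⟩ := pvLookup_isSome (hkeys _ hmemu)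
      have hpos : posOf reihe reihe[i1 + (d + 1)] = i1 + (d + 1) := by
        rw [posOf_eq_idxOf]; exact hnd.idxOf_getElem _ hj
      have hcast : ((posOf reihe reihe[i1 + (d + 1)] : Nat) : Int) - 1 = ((i1 + d : Nat) : Int) := by
        rw [hpos]; push_cast; ring
      have hget : PySem.List.pyGet? reihe (((posOf reihe reihe[i1 + (d + 1)] : Nat) : Int) - 1) =
          some reihe[i1 + d] := by
        rw [hcast, PySem.List.pyGet?_natCast, List.getElem?_eq_getElem (by omega)]
      have htake : (reihe.drop (i1 + 1)).take (d + 1) =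
          (reihe.drop (i1 + 1)).take d ++ [reihe[i1 + (d + 1)]] := by
        rw [List.take_add_one, List.getElem?_eq_getElem hdlen, hdval]
        simp
      have step : berechnenLoop m1 mList reihe (f + 1) w reihe[i1 + (d + 1)] =
          berechnenLoop m1 mList reihe f (w * f0) reihe[i1 + d] := by
        simp only [berechnenLoop, hne, hf0, hget, Bool.false_eq_true, if_false]
      rw [step, ih (i1 + d) (by omega) (w * f0) f rfl (by omega)
        (fun u hu => hkeys u (by rw [htake]; exact List.mem_append_left _ hu))]
      rw [htake, pvProd_append]
      simp [pvProd, hf0, mul_assoc, mul_comm]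

-- wrap phase: from reihe[j] (j < i1) down to reihe[0], then reihe[-1], then the descending phase to m1
theorem wrap_spec (m1 : String) (mList : List (String × Int)) (reihe : List String)
    (hnd : reihe.Nodup) (i1 : Nat) (hi1 : i1 < reihe.length) (hm1 : reihe[i1] = m1) :
    ∀ (j : Nat) (hj : j < i1) (hjl : j < reihe.length) (w : Int) (fuel : Nat),
      j + 2 + (reihe.length - 1 - i1) ≤ fuel →
      (∀ u ∈ reihe.take (j + 1) ++ reihe.drop (i1 + 1), u ∈ mList.map (·.1)) →
      berechnenLoop m1 mList reihe fuel w reihe[j] =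
        some (w * pvProd mList (reihe.take (j + 1) ++ reihe.drop (i1 + 1))) := by
  intro j
  induction j with
  | zero =>
    intro hj hjl w fuel hfuel hkeys
    obtain ⟨f, rfl⟩ : ∃ f, fuel = f + 1 := ⟨fuel - 1, by omega⟩
    · have h0 : (0 : Nat) < reihe.length := by omega
      have hne : (m1 == reihe[0]'h0) = false := by
        simp only [beq_eq_false_iff_ne, ne_eq]
        intro h
        have h1 : reihe.idxOf (reihe[0]'h0) = 0 := hnd.idxOf_getElem _ h0
        rw [← h, ← hm1, hnd.idxOf_getElem i1 hi1] at h1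
        omega
      have hmemu : reihe[0]'h0 ∈ reihe.take 1 ++ reihe.drop (i1 + 1) := by
        apply List.mem_append_left
        rw [List.mem_take_iff_getElem]
        exact ⟨0, by omega, rfl⟩
      obtain ⟨f0, hf0⟩ := pvLookup_isSome (hkeys _ hmemu)
      have hpos : posOf reihe (reihe[0]'h0) = 0 := by
        rw [posOf_eq_idxOf]; exact hnd.idxOf_getElem _ h0
      have hlast : reihe.length - 1 < reihe.length := by omega
      have hget : PySem.List.pyGet? reihe (((posOf reihe (reihe[0]'h0) : Nat) : Int) - 1) =
          some (reihe[reihe.length - 1]'hlast) := by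
        rw [hpos]
        simpa using (by
          rw [PySem.List.pyGet?_neg_one, List.getLast?_eq_getElem?,
            List.getElem?_eq_getElem hlast] :
          PySem.List.pyGet? reihe (-1) = some (reihe[reihe.length - 1]'hlast))
      have step : berechnenLoop m1 mList reihe (f + 1) w (reihe[0]'h0) =
          berechnenLoop m1 mList reihe f (w * f0) (reihe[reihe.length - 1]'hlast) := by
        simp only [berechnenLoop, hne, hf0, hget, Bool.false_eq_true, if_false]
      have hdfull : (reihe.drop (i1 + 1)).take (reihe.length - 1 - i1) = reihe.drop (i1 + 1) := by
        apply List.take_of_length_le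
        simp [List.length_drop]; omega
      have hrec := loop_spec m1 mList reihe hnd i1 hi1 hm1 (reihe.length - 1 - i1)
        (reihe.length - 1) hlast (w * f0) f (by omega) (by omega)
        (by rw [hdfull]; exact fun u hu => hkeys u (List.mem_append_right _ hu))
      rw [step, hrec, hdfull]
      have htake1 : reihe.take 1 = [reihe[0]'h0] := by
        rw [List.take_one, List.head?_eq_getElem?, List.getElem?_eq_getElem h0]
        rfl
      rw [htake1, pvProd_append]
      simp [pvProd, hf0, mul_assoc, mul_comm]
  | succ j ih =>
    intro hj hjl1 w fuel hfuel hkeys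
    obtain ⟨f, rfl⟩ : ∃ f, fuel = f + 1 := ⟨fuel - 1, by omega⟩
    · have hjl : j + 1 < reihe.length := hjl1
      have hne : (m1 == reihe[j + 1]'hjl) = false := by
        simp only [beq_eq_false_iff_ne, ne_eq]
        intro h
        have h1 : reihe.idxOf (reihe[j + 1]'hjl) = j + 1 := hnd.idxOf_getElem _ hjl
        rw [← h, ← hm1, hnd.idxOf_getElem i1 hi1] at h1
        omega
      have hmemu : reihe[j + 1]'hjl ∈ reihe.take (j + 2) ++ reihe.drop (i1 + 1) := by
        apply List.mem_append_left
        rw [List.mem_take_iff_getElem]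
        exact ⟨j + 1, by omega, rfl⟩
      obtain ⟨f0, hf0⟩ := pvLookup_isSome (hkeys _ hmemu)
      have hpos : posOf reihe (reihe[j + 1]'hjl) = j + 1 := by
        rw [posOf_eq_idxOf]; exact hnd.idxOf_getElem _ hjl
      have hcast : ((posOf reihe (reihe[j + 1]'hjl) : Nat) : Int) - 1 = ((j : Nat) : Int) := by
        rw [hpos]; push_cast; ring
      have hget : PySem.List.pyGet? reihe (((posOf reihe (reihe[j + 1]'hjl) : Nat) : Int) - 1) =
          some (reihe[j]'(by omega)) := by
        rw [hcast, PySem.List.pyGet?_natCast, List.getElem?_eq_getElem (by omega)]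
      have step : berechnenLoop m1 mList reihe (f + 1) w (reihe[j + 1]'hjl) =
          berechnenLoop m1 mList reihe f (w * f0) (reihe[j]'(by omega)) := by
        simp only [berechnenLoop, hne, hf0, hget, Bool.false_eq_true, if_false]
      have htake : reihe.take (j + 2) = reihe.take (j + 1) ++ [reihe[j + 1]'hjl] := by
        rw [List.take_add_one, List.getElem?_eq_getElem hjl]
        simp
      have hkeys' : ∀ u ∈ reihe.take (j + 1) ++ reihe.drop (i1 + 1), u ∈ mList.map (·.1) := by
        intro u hu
        rcases List.mem_append.mp hu with h | h
        · exact hkeys u (List.mem_append_left _ (by rw [htake]; exact List.mem_append_left _ h))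
        · exact hkeys u (List.mem_append_right _ h)
      rw [step, ih (by omega) (by omega) (w * f0) f (by omega) hkeys', htake,
        List.append_assoc, List.singleton_append]
      congr 1
      simp [pvProd, hf0, mul_assoc, mul_comm, mul_left_comm]

-- ===== VERDICT (by name: the statement is the Claim_ definition above) =====
theorem berechnen_spec : Claim_equal_berechnen := by
  intro wert1 wert2 m1 m2 mList reihe hdom hpre
  unfold Spec_berechnen
  by_cases hm : m1 = m2
  · subst hm
    simp [berechnen, berechnen_alt, berechnenLoop]
  · rcases hpre with h | ⟨hnd, hm1, hm2, hkeys⟩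
    · exact absurd h hm
    have hi1 : reihe.idxOf m1 < reihe.length := List.idxOf_lt_length_iff.mpr hm1
    have hi2 : reihe.idxOf m2 < reihe.length := List.idxOf_lt_length_iff.mpr hm2
    set i1 := reihe.idxOf m1 with hi1def
    set i2 := reihe.idxOf m2 with hi2def
    by_cases hle : i1 ≤ i2
    · have hkeys' : ∀ u ∈ (reihe.drop (i1 + 1)).take (i2 - i1), u ∈ mList.map (·.1) := by
        intro u hu
        apply hkeys
        unfold pvNeeded
        rw [← hi1def, ← hi2def, if_pos hle]
        exact hu
      have hloop := loop_spec m1 mList reihe hnd i1 hi1 (List.getElem_idxOf hi1)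
        (i2 - i1) i2 hi2 wert2 (reihe.length + 1) (by omega) (by omega) hkeys'
      rw [List.getElem_idxOf hi2] at hloop
      have hslice : PySem.List.slice reihe (some ((i1 : Int) + 1)) (some ((i2 : Int) + 1)) =
          (reihe.drop (i1 + 1)).take (i2 - i1) := by
        have hcast1 : (i1 : Int) + 1 = ((i1 + 1 : Nat) : Int) := by push_cast; ring
        have hcast2 : (i2 : Int) + 1 = ((i2 + 1 : Nat) : Int) := by push_cast; ring
        have hsub : i2 + 1 - (i1 + 1) = i2 - i1 := by omega
        rw [hcast1, hcast2, PySem.List.slice_natCast, hsub]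
      have hmulti := multAll_spec mList ((reihe.drop (i1 + 1)).take (i2 - i1)) wert2 hkeys'
      simp only [berechnen, hloop, berechnen_alt, beq_iff_eq, hm, if_false,
        index?_of_mem_nodup hnd hm1, index?_of_mem_nodup hnd hm2, ← hi1def, ← hi2def,
        hle, if_true, hslice, hmulti]
    · have hkeys' : ∀ u ∈ reihe.take (i2 + 1) ++ reihe.drop (i1 + 1), u ∈ mList.map (·.1) := by
        intro u hu
        apply hkeys
        unfold pvNeeded
        rw [← hi1def, ← hi2def, if_neg hle]
        exact hu
      have hloop := wrap_spec m1 mList reihe hnd i1 hi1 (List.getElem_idxOf hi1)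
        i2 (by omega) hi2 wert2 (reihe.length + 1) (by omega) hkeys'
      rw [List.getElem_idxOf hi2] at hloop
      have hslices : PySem.List.slice reihe none (some ((i2 : Int) + 1)) ++
          PySem.List.slice reihe (some ((i1 : Int) + 1)) none =
          reihe.take (i2 + 1) ++ reihe.drop (i1 + 1) := by
        have hcast1 : (i2 : Int) + 1 = ((i2 + 1 : Nat) : Int) := by push_cast; ring
        have hcast2 : (i1 : Int) + 1 = ((i1 + 1 : Nat) : Int) := by push_cast; ring
        rw [hcast1, hcast2, PySem.List.slice_to_natCast, PySem.List.slice_from_natCast]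
      have hmulti := multAll_spec mList (reihe.take (i2 + 1) ++ reihe.drop (i1 + 1)) wert2 hkeys'
      simp only [berechnen, hloop, berechnen_alt, beq_iff_eq, hm, if_false,
        index?_of_mem_nodup hnd hm1, index?_of_mem_nodup hnd hm2, ← hi1def, ← hi2def,
        hle, if_false, hslices, hmulti]
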